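-- pv_equiv track=rewrite | github.com/KevGildea/RotationTheory | 4B17 T3/3Drotations.py | parent_child
-- ===== SOURCE A (Python) =====
-- def jnt_path(graph, start, end, path=[]):
--     path = path + [start]
--     if start == end:
--         return path
--     if not start in graph:
--         return None
--     for node in graph[start]:
--         if node not in path:
--             newpath = jnt_path(graph, node, end, path)
--             if newpath: return newpath
--     return None
--
-- def takeSecond(elem):
--     return elem[1]
--
-- def parent_child(graph):
--     parent_child_pairs = []
--     for i in range(max(graph[max(graph)])+1):
--         for j in range(max(graph[max(graph)])+1):
--             pair = jnt_path(dir_graph, i, j)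
--             if pair != None:
--                 if len(pair)==2:
--                     parent_child_pairs.append(pair)
--     parent_child_pairs.sort(key=takeSecond)
--     return parent_child_pairs
--
-- dir_graph = {0: [1],
--              1: [2],
--              2: [3],
--              3: [4],
--              4: [5]}
-- ===== SOURCE B (Python) =====
-- dir_graph = {0: [1],
--              1: [2],
--              2: [3],
--              3: [4],
--              4: [5]}
--
--
-- def parent_child(graph):
--     # Direct parent->child links of dir_graph whose endpoints fall inside the
--     # scanned node range, sorted by child.
--     n = max(graph[max(graph)]) + 1
--     pairs = [[parent, child]
--              for parent, children in dir_graph.items()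
--              for child in children
--              if parent < n and child < n]
--     pairs.sort(key=lambda pair: pair[1])
--     return pairs
-- ===== Notes on version B (the rewrite author's own statement) =====
-- stated objective: faster
-- what changed: A runs a recursive joint-path search over the module-level dir_graph for every (i,j) in an N*N grid (N = max(graph[max(graph)])+1), keeping the length-2 paths; B enumerates dir_graph's edges directly, keeps those with both endpoints below N, and sorts by child. Pre_ excludes only inputs where A raises ValueError (empty dict, or empty neighbour list at the maximal key).
import Mathlib
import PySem

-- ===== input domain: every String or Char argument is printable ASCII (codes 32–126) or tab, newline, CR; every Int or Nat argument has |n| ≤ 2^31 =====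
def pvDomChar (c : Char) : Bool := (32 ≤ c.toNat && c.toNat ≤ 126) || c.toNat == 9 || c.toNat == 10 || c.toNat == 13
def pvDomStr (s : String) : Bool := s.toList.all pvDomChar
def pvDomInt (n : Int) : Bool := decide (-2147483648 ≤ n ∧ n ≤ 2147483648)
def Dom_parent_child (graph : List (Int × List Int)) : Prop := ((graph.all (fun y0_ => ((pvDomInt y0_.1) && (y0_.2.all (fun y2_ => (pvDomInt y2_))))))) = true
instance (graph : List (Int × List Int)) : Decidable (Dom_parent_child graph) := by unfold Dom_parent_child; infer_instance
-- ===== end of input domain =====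

-- B replaces A's N^2 recursive joint-path searches over the module-level dir_graph by a direct
-- enumeration of dir_graph's edges with both endpoints below N, then a sort by child; faster (asymptotic).


-- ===== PORT A =====
-- the module-level dir_graph = {0:[1],1:[2],2:[3],3:[4],4:[5]} that jnt_path is called on
def dirGraphA : PySem.Dict Int (List Int) :=
  PySem.Dict.mk [(0, [1]), (1, [2]), (2, [3]), (3, [4]), (4, [5])]

-- jnt_path(dir_graph, start, end, path): literal transliteration; 'fuel' is only a totality
-- guard (each recursive call adds a fresh node of the 6-node chain to path, so the depth from
-- an empty path is at most 6 < 7 and the fuel branch is never taken on parent_child's calls).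
def jntPathA (fuel : Nat) (start endv : Int) (path : List Int) : Option (List Int) :=
  match fuel with
  | 0 => none
  | fuel + 1 =>
    let path := path ++ [start]
    if start = endv then some path
    else if (dirGraphA.contains start) = false then none
    else
      -- 'for node in graph[start]: if node not in path: …; if newpath: return newpath'
      (dirGraphA.getD start []).foldl (fun acc node =>
        match acc with
        | some r => some r
        | none =>
          if node ∈ path then none
          else match jntPathA fuel node endv path with
            | none => none
            | some np => if np = [] then none else some np) none

def parent_child (graph : List (Int × List Int)) : List (List Int) :=
  let d := PySem.Dict.mk graph
  match PySem.List.max? d.keys (fun x => x) with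
  | none => []   -- Python: max(graph) raises ValueError here (excluded by Pre_)
  | some k =>
    match PySem.List.max? (d.getD k []) (fun x => x) with
    | none => []  -- Python: max(graph[max(graph)]) raises ValueError here (excluded by Pre_)
    | some m =>
      let n := m + 1
      let pairs := (PySem.List.pyRange 0 n 1).foldl (fun acc i =>
        (PySem.List.pyRange 0 n 1).foldl (fun acc j =>
          match jntPathA 7 i j [] with
          | none => acc
          | some pair => if pair.length = 2 then acc ++ [pair] else acc) acc) []
      -- pairs.sort(key=takeSecond); elem[1] never raises since every kept pair has length 2
      PySem.List.sorted pairs (fun p => PySem.List.pyGetD p 1 0) false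

-- ===== PORT B =====
-- the same module-level dir_graph constant, as Source B carries it
def dirGraphB : PySem.Dict Int (List Int) :=
  PySem.Dict.mk [(0, [1]), (1, [2]), (2, [3]), (3, [4]), (4, [5])]

def parent_child_alt (graph : List (Int × List Int)) : List (List Int) :=
  let d := PySem.Dict.mk graph
  match PySem.List.max? d.keys (fun x => x) with
  | none => []   -- max(graph) raises ValueError here (excluded by Pre_)
  | some k =>
    match PySem.List.max? (d.getD k []) (fun x => x) with
    | none => []  -- max(graph[max(graph)]) raises ValueError here (excluded by Pre_)
    | some m =>
      let n := m + 1
      -- [[parent, child] for parent, children in dir_graph.items() for child in children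
      --  if parent < n and child < n]
      let pairs := dirGraphB.items.flatMap (fun pc =>
        (pc.2.filter (fun c => decide (pc.1 < n) && decide (c < n))).map (fun c => [pc.1, c]))
      -- pairs.sort(key=lambda pair: pair[1])
      PySem.List.sorted pairs (fun p => PySem.List.pyGetD p 1 0) false

-- ===== PRECONDITION & SPEC =====
-- Pre_ excludes exactly the inputs on which the Python A raises ValueError: the empty dict,
-- and an empty neighbour list at the maximal key (max() of an empty sequence).
def Pre_parent_child (graph : List (Int × List Int)) : Prop :=
  (match PySem.List.max? ((PySem.Dict.mk graph).keys) (fun x => x) with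
   | none => false
   | some k => decide (PySem.Dict.getD (PySem.Dict.mk graph) k [] ≠ [])) = true
instance (graph : List (Int × List Int)) : Decidable (Pre_parent_child graph) := by
  unfold Pre_parent_child; infer_instance

def pvWitness_parent_child : (List (Int × List Int)) := [(0, [1]), (1, [2])]

def Spec_parent_child (graph : List (Int × List Int)) (out : List (List Int)) : Prop := out = parent_child_alt graph
instance (graph : List (Int × List Int)) (out : List (List Int)) : Decidable (Spec_parent_child graph out) := by unfold Spec_parent_child; infer_instance

-- ===== CLAIM (what is proved, stated in full; the proofs are below) =====
def Claim_equal_parent_child : Prop := ∀ (graph : List (Int × List Int)), Dom_parent_child graph → Pre_parent_child graph → Spec_parent_child graph (parent_child graph)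

-- ===== LEMMAS AND PROOFS =====

-- what one cell (i, j) of A's double loop contributes to parent_child_pairs
def keepA (i j : Int) : List (List Int) :=
  match jntPathA 7 i j [] with
  | none => []
  | some p => if p.length = 2 then [p] else []

-- jnt_path on the chain dir_graph yields a length-2 path exactly for the direct edges (i, i+1)
lemma keepA_eq (i j : Int) :
    keepA i j = if 0 ≤ i ∧ i ≤ 4 ∧ j = i + 1 then [[i, i + 1]] else [] := by
  by_cases hij : i = j
  · subst hij
    rw [if_neg (by omega)]
    simp [keepA, jntPathA]
  · by_cases hi0 : i = 0
    · subst hi0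
      by_cases e1 : j = 1; · subst e1; decide
      by_cases e2 : j = 2; · subst e2; decide
      by_cases e3 : j = 3; · subst e3; decide
      by_cases e4 : j = 4; · subst e4; decide
      by_cases e5 : j = 5; · subst e5; decide
      rw [if_neg (by omega)]
      simp [keepA, jntPathA, dirGraphA, PySem.Dict.getD, PySem.Dict.get?, PySem.Dict.contains,
        hij, Ne.symm e1, Ne.symm e2, Ne.symm e3, Ne.symm e4, Ne.symm e5]
    by_cases hi1 : i = 1
    · subst hi1
      by_cases e2 : j = 2; · subst e2; decide
      by_cases e3 : j = 3; · subst e3; decide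
      by_cases e4 : j = 4; · subst e4; decide
      by_cases e5 : j = 5; · subst e5; decide
      rw [if_neg (by omega)]
      simp [keepA, jntPathA, dirGraphA, PySem.Dict.getD, PySem.Dict.get?, PySem.Dict.contains,
        hij, Ne.symm e2, Ne.symm e3, Ne.symm e4, Ne.symm e5]
    by_cases hi2 : i = 2
    · subst hi2
      by_cases e3 : j = 3; · subst e3; decide
      by_cases e4 : j = 4; · subst e4; decide
      by_cases e5 : j = 5; · subst e5; decide
      rw [if_neg (by omega)]
      simp [keepA, jntPathA, dirGraphA, PySem.Dict.getD, PySem.Dict.get?, PySem.Dict.contains,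
        hij, Ne.symm e3, Ne.symm e4, Ne.symm e5]
    by_cases hi3 : i = 3
    · subst hi3
      by_cases e4 : j = 4; · subst e4; decide
      by_cases e5 : j = 5; · subst e5; decide
      rw [if_neg (by omega)]
      simp [keepA, jntPathA, dirGraphA, PySem.Dict.getD, PySem.Dict.get?, PySem.Dict.contains,
        hij, Ne.symm e4, Ne.symm e5]
    by_cases hi4 : i = 4
    · subst hi4
      by_cases e5 : j = 5; · subst e5; decide
      rw [if_neg (by omega)]
      simp [keepA, jntPathA, dirGraphA, PySem.Dict.getD, PySem.Dict.get?, PySem.Dict.contains,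
        hij, Ne.symm e5]
    · rw [if_neg (by omega)]
      simp [keepA, jntPathA, dirGraphA, PySem.Dict.contains,
        hij, Ne.symm hi0, Ne.symm hi1, Ne.symm hi2, Ne.symm hi3, Ne.symm hi4]

lemma flatMap_ite_singleton (l : List Int) (c : Int) (v : List (List Int)) (h : l.Nodup) :
    l.flatMap (fun j => if j = c then v else []) = if c ∈ l then v else [] := by
  induction l with
  | nil => simp
  | cons x t ih =>
    simp only [List.nodup_cons] at h
    by_cases hx : x = c
    · subst hx
      simp [List.flatMap_cons, h.1, ih h.2]
    · simp [List.flatMap_cons, hx, ih h.2, Ne.symm hx]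

-- A's inner j-loop appends exactly the keepA contributions
lemma innerA_eq (i n : Int) (acc : List (List Int)) :
    (PySem.List.pyRange 0 n 1).foldl (fun acc j =>
        match jntPathA 7 i j [] with
        | none => acc
        | some pair => if pair.length = 2 then acc ++ [pair] else acc) acc
      = acc ++ (PySem.List.pyRange 0 n 1).flatMap (fun j => keepA i j) := by
  have hb : (fun (acc : List (List Int)) (j : Int) =>
      match jntPathA 7 i j [] with
      | none => acc
      | some pair => if pair.length = 2 then acc ++ [pair] else acc)
      = fun acc j => acc ++ keepA i j := by
    funext acc j
    unfold keepA
    cases jntPathA 7 i j [] with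
    | none => simp
    | some p => by_cases hl : p.length = 2 <;> simp [hl]
  rw [hb, PySem.List.foldl_append_eq_flatMap]

-- one full row of A's double loop: a single direct edge, if its endpoints are in range
lemma cellA_eq (i n : Int) :
    (PySem.List.pyRange 0 n 1).flatMap (fun j => keepA i j)
      = if 0 ≤ i ∧ i ≤ 4 ∧ i + 1 < n then [[i, i + 1]] else [] := by
  by_cases hc : 0 ≤ i ∧ i ≤ 4
  · have hk : (fun j => keepA i j) = fun j => if j = i + 1 then [[i, i + 1]] else [] := by
      funext j
      rw [keepA_eq]
      by_cases hj : j = i + 1 <;> simp [hj, hc.1, hc.2]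
    rw [hk, flatMap_ite_singleton _ _ _ (PySem.List.nodup_pyRange_one 0 n)]
    by_cases hn : i + 1 < n
    · rw [if_pos (by rw [PySem.List.mem_pyRange_one]; omega), if_pos ⟨hc.1, hc.2, hn⟩]
    · rw [if_neg (by rw [PySem.List.mem_pyRange_one]; omega), if_neg (by tauto)]
  · rw [List.flatMap_eq_nil_iff.mpr (fun j _ => by rw [keepA_eq, if_neg (by tauto)]),
      if_neg (by tauto)]

lemma flatMap_singleton_map (g : Int → List (List Int)) (l : List Int)
    (h : ∀ x ∈ l, g x = [[x, x + 1]]) :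
    l.flatMap g = l.map (fun i => [i, i + 1]) := by
  induction l with
  | nil => simp
  | cons x t ih =>
    simp [List.flatMap_cons, h x (by simp), ih (fun y hy => h y (by simp [hy]))]

-- collapsing A's whole double loop to the closed-form range of direct edges
lemma totalA_eq (n : Int) :
    (PySem.List.pyRange 0 n 1).flatMap
        (fun i => if 0 ≤ i ∧ i ≤ 4 ∧ i + 1 < n then [[i, i + 1]] else [])
      = (PySem.List.pyRange 0 (min 5 (n - 1)) 1).map (fun i => [i, i + 1]) := by
  by_cases hn : 0 < n
  · rw [PySem.List.pyRange_one_append 0 (min 5 (n - 1)) n (by omega) (by omega),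
      List.flatMap_append]
    have h1 : (PySem.List.pyRange 0 (min 5 (n - 1)) 1).flatMap
        (fun i => if 0 ≤ i ∧ i ≤ 4 ∧ i + 1 < n then [[i, i + 1]] else [])
        = (PySem.List.pyRange 0 (min 5 (n - 1)) 1).map (fun i => [i, i + 1]) :=
      flatMap_singleton_map _ _ (fun i hi => by
        rw [PySem.List.mem_pyRange_one] at hi
        rw [if_pos (by omega)])
    have h2 : (PySem.List.pyRange (min 5 (n - 1)) n 1).flatMap
        (fun i => if 0 ≤ i ∧ i ≤ 4 ∧ i + 1 < n then [[i, i + 1]] else []) = [] :=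
      List.flatMap_eq_nil_iff.mpr (fun i hi => by
        rw [PySem.List.mem_pyRange_one] at hi
        rw [if_neg (by omega)])
    rw [h1, h2, List.append_nil]
  · rw [PySem.List.pyRange_one_eq_nil (by omega), PySem.List.pyRange_one_eq_nil (by omega)]
    simp

-- B's edge enumeration evaluates to the same closed-form range of direct edges
lemma pairsB_eq (n : Int) :
    dirGraphB.items.flatMap (fun pc =>
        (pc.2.filter (fun c => decide (pc.1 < n) && decide (c < n))).map (fun c => [pc.1, c]))
      = (PySem.List.pyRange 0 (min 5 (n - 1)) 1).map (fun i => [i, i + 1]) := by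
  by_cases h1 : n ≤ 1
  · rw [PySem.List.pyRange_one_eq_nil (by omega)]
    simp [dirGraphB, List.flatMap_cons,
      show ¬(1:Int) < n from by omega, show ¬(2:Int) < n from by omega,
      show ¬(3:Int) < n from by omega, show ¬(4:Int) < n from by omega]
  by_cases h2 : n = 2; · subst h2; decide
  by_cases h3 : n = 3; · subst h3; decide
  by_cases h4 : n = 4; · subst h4; decide
  by_cases h5 : n = 5; · subst h5; decide
  -- remaining case: 6 ≤ n, every edge of dir_graph is in range
  rw [show min 5 (n - 1) = 5 from by omega,
    show PySem.List.pyRange 0 5 1 = [0, 1, 2, 3, 4] from by decide]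
  simp [dirGraphB, List.flatMap_cons,
    show (0:Int) < n from by omega, show (1:Int) < n from by omega,
    show (2:Int) < n from by omega, show (3:Int) < n from by omega,
    show (4:Int) < n from by omega, show (5:Int) < n from by omega]

-- ===== VERDICT (by name: the statement is the Claim_ definition above) =====
theorem parent_child_spec : Claim_equal_parent_child := by
  intro graph _ hpre2
  unfold Pre_parent_child at hpre2
  unfold Spec_parent_child parent_child parent_child_alt
  cases hk : PySem.List.max? (PySem.Dict.mk graph).keys (fun x => x) with
  | none => rw [hk] at hpre2; simp at hpre2
  | some k =>
    rw [hk] at hpre2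
    simp only [decide_eq_true_eq] at hpre2
    cases hm : PySem.List.max? ((PySem.Dict.mk graph).getD k []) (fun x => x) with
    | none => exact absurd ((PySem.List.max?_eq_none_iff _ _).mp hm) hpre2
    | some m =>
      simp only [hk, hm]
      rw [show (fun (acc : List (List Int)) (i : Int) =>
          (PySem.List.pyRange 0 (m + 1) 1).foldl (fun acc j =>
            match jntPathA 7 i j [] with
            | none => acc
            | some pair => if pair.length = 2 then acc ++ [pair] else acc) acc)
          = fun acc i => acc ++ (PySem.List.pyRange 0 (m + 1) 1).flatMap (fun j => keepA i j)
        from funext fun acc => funext fun i => innerA_eq i (m + 1) acc]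
      rw [PySem.List.foldl_append_eq_flatMap, List.nil_append]
      have hcell : (fun i => (PySem.List.pyRange 0 (m + 1) 1).flatMap (fun j => keepA i j))
          = fun i => if 0 ≤ i ∧ i ≤ 4 ∧ i + 1 < m + 1 then [[i, i + 1]] else [] :=
        funext fun i => cellA_eq i (m + 1)
      rw [hcell, totalA_eq, pairsB_eq]
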